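-- pv_equiv track=rewrite | github.com/Digital-Grinnell/LAMP | sample-objects/mapped-metadata-Rev-0/compare_metadata.py | match_records
-- ===== SOURCE A (Python) =====
-- def index_by_mms_id(records):
--     """Create a dictionary indexed by mms_id"""
--     indexed = {}
--     no_mms = []
--
--     for record in records:
--         mms_id = record.get('mms_id', '').strip()
--         if mms_id:
--             indexed[mms_id] = record
--         else:
--             no_mms.append(record)
--
--     return indexed, no_mms
--
-- def match_records(alma_records, seeklight_records):
--     """Match records between the two sources based on MMS ID"""
--     alma_indexed, alma_no_mms = index_by_mms_id(alma_records)
--     seek_indexed, seek_no_mms = index_by_mms_id(seeklight_records)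
--
--     # Find all MMS IDs
--     all_mms_ids = set(alma_indexed.keys()) | set(seek_indexed.keys())
--
--     # Create matched pairs
--     matched_pairs = []
--     for mms_id in sorted(all_mms_ids):
--         alma_rec = alma_indexed.get(mms_id)
--         seek_rec = seek_indexed.get(mms_id)
--         matched_pairs.append((mms_id, alma_rec, seek_rec))
--
--     return matched_pairs, alma_no_mms, seek_no_mms
-- ===== SOURCE B (Python) =====
-- def match_records(alma_records, seeklight_records):
--     """Match records between the two sources based on MMS ID.
--
--     Sort-merge join: keyed records are collected as (mms_id, record) pairs,
--     stably sorted by mms_id, collapsed so the last record per id survives,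
--     and the two sorted runs are merged with two pointers.  No dictionaries,
--     no key-set union."""
--     alma_pairs, alma_no_mms = _split_keyed(alma_records)
--     seek_pairs, seek_no_mms = _split_keyed(seeklight_records)
--     a = _collapse(sorted(alma_pairs, key=lambda p: p[0]))
--     s = _collapse(sorted(seek_pairs, key=lambda p: p[0]))
--
--     matched_pairs = []
--     i = j = 0
--     while i < len(a) and j < len(s):
--         if a[i][0] < s[j][0]:
--             matched_pairs.append((a[i][0], a[i][1], None))
--             i += 1
--         elif s[j][0] < a[i][0]:
--             matched_pairs.append((s[j][0], None, s[j][1]))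
--             j += 1
--         else:
--             matched_pairs.append((a[i][0], a[i][1], s[j][1]))
--             i += 1
--             j += 1
--     while i < len(a):
--         matched_pairs.append((a[i][0], a[i][1], None))
--         i += 1
--     while j < len(s):
--         matched_pairs.append((s[j][0], None, s[j][1]))
--         j += 1
--     return matched_pairs, alma_no_mms, seek_no_mms
--
-- def _split_keyed(records):
--     pairs, no_mms = [], []
--     for record in records:
--         mms_id = record.get('mms_id', '').strip()
--         if mms_id:
--             pairs.append((mms_id, record))
--         else:
--             no_mms.append(record)
--     return pairs, no_mms
--
-- def _collapse(sorted_pairs):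
--     out = []
--     for pair in sorted_pairs:
--         if out and out[-1][0] == pair[0]:
--             out[-1] = pair
--         else:
--             out.append(pair)
--     return out
-- ===== Notes on version B (the rewrite author's own statement) =====
-- stated objective: alternative
-- what changed: Replaces hash-indexing (two dicts keyed by mms_id plus a set union of their keys, then per-key lookups) by a sort-merge join: each side's keyed records become (mms_id, record) pairs, stably sorted and collapsed so the last record per id wins, and the two sorted runs are merged with two pointers; no dictionary or set is built.
import Mathlib
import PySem

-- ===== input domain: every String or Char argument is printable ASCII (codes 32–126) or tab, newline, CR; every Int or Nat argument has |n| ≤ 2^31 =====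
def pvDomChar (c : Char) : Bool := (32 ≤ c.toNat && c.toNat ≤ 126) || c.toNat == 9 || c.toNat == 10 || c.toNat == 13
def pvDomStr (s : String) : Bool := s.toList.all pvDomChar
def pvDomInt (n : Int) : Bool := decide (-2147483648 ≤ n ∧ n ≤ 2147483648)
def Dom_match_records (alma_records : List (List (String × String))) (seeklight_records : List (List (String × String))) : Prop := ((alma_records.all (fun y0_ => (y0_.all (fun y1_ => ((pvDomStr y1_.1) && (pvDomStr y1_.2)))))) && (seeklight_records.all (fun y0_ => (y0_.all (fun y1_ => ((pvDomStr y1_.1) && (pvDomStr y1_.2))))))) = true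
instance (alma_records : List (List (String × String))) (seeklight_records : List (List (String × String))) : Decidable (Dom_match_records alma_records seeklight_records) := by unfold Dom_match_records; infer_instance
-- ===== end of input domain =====

-- B replaces A's hash indexing (two dicts keyed by mms_id, a set union of their keys, two
-- lookups per key) by a sort-merge join: (mms_id, record) pairs, stably sorted and collapsed
-- so the last record per id survives, then a two-pointer merge (objective: alternative).

abbrev PvRec := List (String × String)
abbrev PvPair := String × PvRec
abbrev PvTriple := String × Option PvRec × Option PvRec

-- ===== PORT A =====
-- record.get('mms_id', '').strip()  (the same key expression is computed by Source B)
def pvKeyA (record : PvRec) : String :=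
  PySem.Str.strip ((PySem.Dict.mk record).getD "mms_id" "")

def index_by_mms_id (records : List PvRec) :
    PySem.Dict String PvRec × List PvRec :=
  records.foldl
    (fun st record =>
      if pvKeyA record ≠ "" then (st.1.insert (pvKeyA record) record, st.2)
      else (st.1, st.2 ++ [record]))
    (PySem.Dict.empty, [])

def match_records (alma_records : List (List (String × String))) (seeklight_records : List (List (String × String))) : (List (String × (Option (List (String × String))) × (Option (List (String × String))))) × (List (List (String × String))) × (List (List (String × String))) :=
  let alma_p := index_by_mms_id alma_records
  let seek_p := index_by_mms_id seeklight_records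
  -- set(alma_indexed.keys()) | set(seek_indexed.keys())
  let all_mms_ids := PySem.Set.union (PySem.Set.ofList alma_p.1.keys) (PySem.Set.ofList seek_p.1.keys)
  let matched_pairs := (PySem.List.sorted all_mms_ids (fun x => x) false).foldl
      (fun acc mms_id => acc ++ [(mms_id, alma_p.1.get? mms_id, seek_p.1.get? mms_id)]) []
  (matched_pairs, alma_p.2, seek_p.2)

-- ===== PORT B =====
-- _split_keyed(records): one pass collecting (mms_id, record) pairs and the keyless records
def pvSplitKeyed (records : List PvRec) : List PvPair × List PvRec :=
  records.foldl
    (fun st record =>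
      if pvKeyA record ≠ "" then (st.1 ++ [(pvKeyA record, record)], st.2)
      else (st.1, st.2 ++ [record]))
    ([], [])

-- _collapse(sorted_pairs): 'if out and out[-1][0] == pair[0]: out[-1] = pair else: out.append(pair)';
-- 'out[-1]' is out.getLast?, 'out[-1] = pair' is out.dropLast ++ [pair]
def pvCollapse (sorted_pairs : List PvPair) : List PvPair :=
  sorted_pairs.foldl
    (fun out pair =>
      match out.getLast? with
      | some q => if q.1 = pair.1 then out.dropLast ++ [pair] else out ++ [pair]
      | none => out ++ [pair])
    []

-- the three while-loops of Source B's two-pointer merge, as the obvious recursion on the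
-- two suffixes a[i:], s[j:] (same comparisons, same appended triples, in the same order)
def pvMerge : List PvPair → List PvPair → List PvTriple
  | a, [] => a.map (fun p => (p.1, some p.2, (none : Option PvRec)))
  | [], q :: s => (q.1, (none : Option PvRec), some q.2) :: pvMerge [] s
  | p :: a, q :: s =>
    if p.1 < q.1 then (p.1, some p.2, (none : Option PvRec)) :: pvMerge a (q :: s)
    else if q.1 < p.1 then (q.1, (none : Option PvRec), some q.2) :: pvMerge (p :: a) s
    else (p.1, some p.2, some q.2) :: pvMerge a s
termination_by a s => a.length + s.length

def match_records_alt (alma_records : List (List (String × String))) (seeklight_records : List (List (String × String))) : (List (String × (Option (List (String × String))) × (Option (List (String × String))))) × (List (List (String × String))) × (List (List (String × String))) :=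
  let ap := pvSplitKeyed alma_records
  let sp := pvSplitKeyed seeklight_records
  let a := pvCollapse (PySem.List.sorted ap.1 (fun p => p.1) false)
  let s := pvCollapse (PySem.List.sorted sp.1 (fun p => p.1) false)
  (pvMerge a s, ap.2, sp.2)

-- ===== PRECONDITION & SPEC =====
def Spec_match_records (alma_records : List (List (String × String))) (seeklight_records : List (List (String × String))) (out : (List (String × (Option (List (String × String))) × (Option (List (String × String))))) × (List (List (String × String))) × (List (List (String × String)))) : Prop := out = match_records_alt alma_records seeklight_records
instance (alma_records : List (List (String × String))) (seeklight_records : List (List (String × String))) (out : (List (String × (Option (List (String × String))) × (Option (List (String × String))))) × (List (List (String × String))) × (List (List (String × String)))) : Decidable (Spec_match_records alma_records seeklight_records out) := by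
  unfold Spec_match_records
  -- infer_instance alone exceeds the synthesis answer-size limit on this nested type; build it in stages
  letI h2 : DecidableEq (String × Option (List (String × String)) × Option (List (String × String))) := inferInstance
  letI h3 : DecidableEq (List (String × Option (List (String × String)) × Option (List (String × String)))) := inferInstance
  letI h4 : DecidableEq (List (List (String × String))) := inferInstance
  infer_instance

-- ===== CLAIM (what is proved, stated in full; the proofs are below) =====
def Claim_equal_match_records : Prop := ∀ (alma_records : List (List (String × String))) (seeklight_records : List (List (String × String))), Dom_match_records alma_records seeklight_records → Spec_match_records alma_records seeklight_records (match_records alma_records seeklight_records)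

-- ===== LEMMAS AND PROOFS =====

-- lookup of the LAST pair carrying a given key (what a dict overwritten in order returns,
-- and what the collapse of a stably sorted run keeps)
def pvLook (l : List PvPair) (k : String) : Option PvRec :=
  ((l.filter (fun p => p.1 = k)).getLast?).map (·.2)

theorem pv_dict_look (l : List PvPair) (d : PySem.Dict String PvRec) (k : String) :
    (l.foldl (fun d p => d.insert p.1 p.2) d).get? k
    = match (l.filter (fun p => p.1 = k)).getLast? with
      | some p => some p.2
      | none => d.get? k := by
  induction l using List.reverseRecOn with
  | nil => simp
  | append_singleton t p ih =>
    rw [List.foldl_append, List.filter_append]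
    simp only [List.foldl_cons, List.foldl_nil, List.filter_cons, List.filter_nil]
    by_cases h : p.1 = k
    · simp [h]
    · simp [h, PySem.Dict.get?_insert, ih, Ne.symm h]

theorem pv_ofList_sublist {α : Type} [BEq α] (xs : List α) : (PySem.Set.ofList xs).Sublist xs := by
  induction xs using List.reverseRecOn with
  | nil => simp [PySem.Set.ofList]
  | append_singleton t x ih =>
    unfold PySem.Set.ofList at *
    rw [List.foldl_append]
    simp only [List.foldl_cons, List.foldl_nil]
    unfold PySem.Set.add
    split
    · exact ih.trans (List.sublist_append_left t [x])
    · exact List.Sublist.append ih (List.Sublist.refl [x])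

theorem pv_dedup_pairwise_lt (xs : List String) (h : xs.Pairwise (· ≤ ·)) :
    (PySem.List.dedup xs).Pairwise (· < ·) := by
  rw [PySem.List.dedup_eq_ofList]
  have hle := h.sublist (pv_ofList_sublist xs)
  have hne : (PySem.Set.ofList xs).Pairwise (· ≠ ·) := PySem.Set.nodup_ofList xs
  exact (hle.and hne).imp (fun h => lt_of_le_of_ne h.1 h.2)

theorem pv_dedup_append_mem (xs : List String) (x : String) (h : x ∈ xs) :
    PySem.List.dedup (xs ++ [x]) = PySem.List.dedup xs := by
  rw [PySem.List.dedup_eq_ofList, PySem.List.dedup_eq_ofList, PySem.Set.ofList_append_singleton]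
  exact PySem.Set.add_of_mem ((PySem.Set.mem_ofList xs x).mpr h)

theorem pv_dedup_append_not_mem (xs : List String) (x : String) (h : x ∉ xs) :
    PySem.List.dedup (xs ++ [x]) = PySem.List.dedup xs ++ [x] := by
  rw [PySem.List.dedup_eq_ofList, PySem.List.dedup_eq_ofList, PySem.Set.ofList_append_singleton]
  exact PySem.Set.add_of_not_mem (fun hx => h ((PySem.Set.mem_ofList xs x).mp hx))

theorem pv_insertBy_filter (x : PvPair) (ys : List PvPair) (k : String)
    (h : ys.Pairwise (fun a b => a.1 ≤ b.1)) :
    (PySem.List.insertBy (fun a b => decide (a.1 < b.1)) x ys).filter (fun p => p.1 = k)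
    = ys.filter (fun p => p.1 = k) ++ if x.1 = k then [x] else [] := by
  induction ys with
  | nil => simp [PySem.List.insertBy]; split <;> simp_all
  | cons y t ih =>
    rw [List.pairwise_cons] at h
    by_cases hlt : x.1 < y.1
    · rw [show PySem.List.insertBy (fun a b => decide (a.1 < b.1)) x (y :: t)
          = x :: y :: t by simp [PySem.List.insertBy, hlt]]
      by_cases hk : x.1 = k
      · have hy : ¬ (y.1 = k) := by intro e; rw [e, ← hk] at hlt; exact lt_irrefl _ hlt
        have ht : ∀ z ∈ t, ¬ (z.1 = k) := by
          intro z hz e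
          have := h.1 z hz
          rw [e, ← hk] at *
          exact absurd (lt_of_lt_of_le hlt this) (lt_irrefl _)
        have htf : t.filter (fun p => p.1 = k) = [] :=
          List.filter_eq_nil_iff.mpr (by intro z hz; simpa using ht z hz)
        simp [hk, hy, htf]
      · simp [List.filter_cons, hk]
    · rw [show PySem.List.insertBy (fun a b => decide (a.1 < b.1)) x (y :: t)
          = y :: PySem.List.insertBy (fun a b => decide (a.1 < b.1)) x t by
            simp [PySem.List.insertBy, hlt]]
      rw [List.filter_cons, List.filter_cons, ih h.2]
      split <;> simp

theorem pv_sorted_filter (xs : List PvPair) (k : String) :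
    (PySem.List.sorted xs (fun p => p.1) false).filter (fun p => p.1 = k)
    = xs.filter (fun p => p.1 = k) := by
  induction xs using List.reverseRecOn with
  | nil => simp [PySem.List.sorted_eq_foldl_insertBy]
  | append_singleton t x ih =>
    rw [PySem.List.sorted_eq_foldl_insertBy, List.foldl_append]
    simp only [List.foldl_cons, List.foldl_nil]
    rw [← PySem.List.sorted_eq_foldl_insertBy]
    rw [pv_insertBy_filter x _ k (PySem.List.sorted_pairwise t (fun p => p.1))]
    rw [ih, List.filter_append, List.filter_cons]
    split <;> simp_all

theorem pv_dedup_nil (xs : List String) (h : PySem.List.dedup xs = []) : xs = [] := by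
  cases xs with
  | nil => rfl
  | cons y t =>
    exact absurd ((PySem.List.mem_dedup (y :: t) y).mpr (List.mem_cons_self))
      (by rw [h]; simp)

theorem pv_collapse_spec (q : List PvPair) (hq : (q.map (·.1)).Pairwise (· ≤ ·)) :
    (pvCollapse q).map (·.1) = PySem.List.dedup (q.map (·.1))
    ∧ ∀ k, pvLook (pvCollapse q) k = pvLook q k := by
  revert hq
  induction q using List.reverseRecOn with
  | nil =>
    intro _
    constructor
    · simp [pvCollapse, PySem.List.dedup_eq_ofList, PySem.Set.ofList]
    · intro k; rfl
  | append_singleton t p ih =>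
    intro hq
    rw [List.map_append, List.pairwise_append] at hq
    obtain ⟨hqt, _, hle⟩ := hq
    obtain ⟨iha, ihb⟩ := ih hqt
    have hstep : pvCollapse (t ++ [p]) =
        (match (pvCollapse t).getLast? with
         | some u => if u.1 = p.1 then (pvCollapse t).dropLast ++ [p] else pvCollapse t ++ [p]
         | none => pvCollapse t ++ [p]) := by
      unfold pvCollapse
      rw [List.foldl_append]
      simp only [List.foldl_cons, List.foldl_nil]
    have hkey : PySem.List.dedup ((t ++ [p]).map (·.1))
        = PySem.List.dedup (t.map (·.1) ++ [p.1]) := by simp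
    cases hL : (pvCollapse t).getLast? with
    | none =>
      have hLnil : pvCollapse t = [] := List.getLast?_eq_none_iff.mp hL
      have htnil : t = [] := by
        have := pv_dedup_nil (t.map (·.1)) (by rw [← iha, hLnil]; rfl)
        exact List.map_eq_nil_iff.mp this
      subst htnil
      have hstep2 : pvCollapse ([] ++ [p]) = pvCollapse [] ++ [p] := by
        rw [hstep, hL, hLnil]
      rw [hstep2, hLnil]
      constructor
      · simp [PySem.List.dedup_eq_ofList, PySem.Set.ofList, PySem.Set.add, PySem.Set.empty]
      · intro k; rfl
    | some u =>
      obtain ⟨L', hsplit⟩ := List.getLast?_eq_some_iff.mp hL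
      have hL'keys : (pvCollapse t).map (·.1) = L'.map (·.1) ++ [u.1] := by rw [hsplit]; simp
      have humem : u.1 ∈ t.map (·.1) := by
        have : u.1 ∈ (pvCollapse t).map (·.1) := by rw [hL'keys]; simp
        rw [iha] at this
        exact (PySem.List.mem_dedup _ _).mp this
      have hule : u.1 ≤ p.1 := hle _ humem _ (List.mem_singleton.mpr rfl)
      by_cases heq : u.1 = p.1
      · -- the new pair extends the last run: replace the last element
        have hstep2 : pvCollapse (t ++ [p]) = L' ++ [p] := by
          rw [hstep, hL]
          simp [heq, hsplit]
        rw [hstep2]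
        constructor
        · rw [hkey, pv_dedup_append_mem _ _ (heq ▸ humem), ← iha, hL'keys]
          simp [heq]
        · intro k
          unfold pvLook
          rw [List.filter_append, List.filter_append]
          by_cases hk : p.1 = k
          · simp [hk]
          · have hu : ¬ (u.1 = k) := by rw [heq]; exact hk
            have h1 : List.filter (fun p => decide (p.1 = k)) (pvCollapse t)
                = List.filter (fun p => decide (p.1 = k)) L' := by
              rw [hsplit, List.filter_append]
              simp [hu]
            have := ihb k
            unfold pvLook at this
            rw [h1] at this
            simpa [hk] using this
      · -- the new pair starts a new run: append it
        have hpnot : p.1 ∉ t.map (·.1) := by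
          intro hp
          have : p.1 ∈ (pvCollapse t).map (·.1) := by
            rw [iha]; exact (PySem.List.mem_dedup _ _).mpr hp
          rw [hL'keys] at this
          rcases List.mem_append.mp this with hmem | hmem
          · have hlt : ((pvCollapse t).map (·.1)).Pairwise (· < ·) := by
              rw [iha]; exact pv_dedup_pairwise_lt _ hqt
            rw [hL'keys, List.pairwise_append] at hlt
            have := hlt.2.2 _ hmem _ (List.mem_singleton.mpr rfl)
            exact absurd (lt_of_le_of_lt hule this) (lt_irrefl _)
          · exact heq (List.mem_singleton.mp hmem).symm
        have hstep2 : pvCollapse (t ++ [p]) = pvCollapse t ++ [p] := by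
          rw [hstep, hL]
          simp only [if_neg heq]
        rw [hstep2]
        constructor
        · rw [hkey, pv_dedup_append_not_mem _ _ hpnot, ← iha]
          simp
        · intro k
          unfold pvLook
          rw [List.filter_append, List.filter_append]
          by_cases hk : p.1 = k
          · simp [hk]
          · have := ihb k
            unfold pvLook at this
            simpa [hk] using this

theorem pv_merge_mem (a s : List PvPair) (x : String) :
    x ∈ (pvMerge a s).map (·.1) ↔ x ∈ a.map (·.1) ∨ x ∈ s.map (·.1) := by
  induction a, s using pvMerge.induct with
  | case1 a => simp [pvMerge]
  | case2 q s ih => simp [pvMerge, ih]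
  | case3 p a q s hlt ih =>
    rw [show pvMerge (p :: a) (q :: s)
        = (p.1, some p.2, (none : Option PvRec)) :: pvMerge a (q :: s) by
      rw [pvMerge]; simp [hlt]]
    simp [ih]; tauto
  | case4 p a q s hlt hlt2 ih =>
    rw [show pvMerge (p :: a) (q :: s)
        = (q.1, (none : Option PvRec), some q.2) :: pvMerge (p :: a) s by
      rw [pvMerge]; simp [hlt, hlt2]]
    simp [ih]; tauto
  | case5 p a q s hlt hlt2 ih =>
    rw [show pvMerge (p :: a) (q :: s)
        = (p.1, some p.2, some q.2) :: pvMerge a s by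
      rw [pvMerge]; simp [hlt, hlt2]]
    have hpq : p.1 = q.1 := le_antisymm (le_of_not_gt hlt2) (le_of_not_gt hlt)
    simp [ih]
    constructor
    · rintro (h | h | h) <;> tauto
    · rintro ((h | h) | (h | h))
      · tauto
      · tauto
      · exact Or.inl (h ▸ hpq.symm)
      · tauto

theorem pv_merge_pairwise (a s : List PvPair)
    (ha : (a.map (·.1)).Pairwise (· < ·)) (hs : (s.map (·.1)).Pairwise (· < ·)) :
    ((pvMerge a s).map (·.1)).Pairwise (· < ·) := by
  induction a, s using pvMerge.induct with
  | case1 a => simpa [pvMerge, List.pairwise_map] using (List.pairwise_map.mp ha)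
  | case2 q s ih =>
    rw [List.map_cons, List.pairwise_cons] at hs
    rw [show pvMerge [] (q :: s) = (q.1, (none : Option PvRec), some q.2) :: pvMerge [] s from by
      rw [pvMerge]]
    rw [List.map_cons, List.pairwise_cons]
    refine ⟨fun y hy => ?_, ih ha hs.2⟩
    rcases (pv_merge_mem [] s y).mp hy with h | h
    · simp at h
    · exact hs.1 y h
  | case3 p a q s hlt ih =>
    rw [List.map_cons, List.pairwise_cons] at ha
    rw [show pvMerge (p :: a) (q :: s)
        = (p.1, some p.2, (none : Option PvRec)) :: pvMerge a (q :: s) by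
      rw [pvMerge]; simp [hlt]]
    rw [List.map_cons, List.pairwise_cons]
    refine ⟨fun y hy => ?_, ih ha.2 hs⟩
    rcases (pv_merge_mem a (q :: s) y).mp hy with h | h
    · exact ha.1 y h
    · rw [List.map_cons] at h
      rcases List.mem_cons.mp h with h | h
      · exact h ▸ hlt
      · rw [List.map_cons, List.pairwise_cons] at hs
        exact lt_trans hlt (hs.1 y h)
  | case4 p a q s hlt hlt2 ih =>
    rw [List.map_cons, List.pairwise_cons] at hs
    rw [show pvMerge (p :: a) (q :: s)
        = (q.1, (none : Option PvRec), some q.2) :: pvMerge (p :: a) s by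
      rw [pvMerge]; simp [hlt, hlt2]]
    rw [List.map_cons, List.pairwise_cons]
    refine ⟨fun y hy => ?_, ih ha hs.2⟩
    rcases (pv_merge_mem (p :: a) s y).mp hy with h | h
    · rw [List.map_cons] at h
      rcases List.mem_cons.mp h with h | h
      · exact h ▸ hlt2
      · rw [List.map_cons, List.pairwise_cons] at ha
        exact lt_trans hlt2 (ha.1 y h)
    · exact hs.1 y h
  | case5 p a q s hlt hlt2 ih =>
    have hpq : p.1 = q.1 := le_antisymm (le_of_not_gt hlt2) (le_of_not_gt hlt)
    rw [List.map_cons, List.pairwise_cons] at ha hs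
    rw [show pvMerge (p :: a) (q :: s)
        = (p.1, some p.2, some q.2) :: pvMerge a s by
      rw [pvMerge]; simp [hlt, hlt2]]
    rw [List.map_cons, List.pairwise_cons]
    refine ⟨fun y hy => ?_, ih ha.2 hs.2⟩
    rcases (pv_merge_mem a s y).mp hy with h | h
    · exact ha.1 y h
    · exact hpq ▸ hs.1 y h

theorem pv_look_not_mem (l : List PvPair) (k : String) (h : k ∉ l.map (·.1)) :
    pvLook l k = none := by
  unfold pvLook
  rw [List.filter_eq_nil_iff.mpr (fun p hp hk => h (by
    simp only [List.mem_map]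
    exact ⟨p, hp, by simpa using hk⟩))]
  rfl

theorem pv_look_head (p : PvPair) (l : List PvPair)
    (h : ∀ x ∈ l.map (·.1), p.1 < x) :
    pvLook (p :: l) p.1 = some p.2 := by
  unfold pvLook
  rw [List.filter_cons]
  have hl : l.filter (fun q => q.1 = p.1) = [] :=
    List.filter_eq_nil_iff.mpr (fun q hq hk => by
      have := h q.1 (List.mem_map.mpr ⟨q, hq, rfl⟩)
      simp only [decide_eq_true_eq] at hk
      rw [hk] at this
      exact lt_irrefl _ this)
  simp [hl]

theorem pv_look_tail (p : PvPair) (l : List PvPair) (k : String) (h : ¬ k = p.1) :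
    pvLook (p :: l) k = pvLook l k := by
  unfold pvLook
  rw [List.filter_cons]
  have h' : ¬ p.1 = k := fun e => h e.symm
  simp [h']

theorem pv_look_nodup (a : List PvPair) (ha : (a.map (·.1)).Pairwise (· < ·))
    (p : PvPair) (hp : p ∈ a) : pvLook a p.1 = some p.2 := by
  induction a with
  | nil => cases hp
  | cons h t ih =>
    rw [List.map_cons, List.pairwise_cons] at ha
    rcases List.mem_cons.mp hp with rfl | hp
    · exact pv_look_head _ _ ha.1
    · have hne : ¬ p.1 = h.1 := by
        intro e
        have := ha.1 p.1 (List.mem_map.mpr ⟨p, hp, rfl⟩)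
        rw [e] at this
        exact lt_irrefl _ this
      rw [pv_look_tail _ _ _ hne]
      exact ih ha.2 hp

theorem pv_merge_look (a s : List PvPair)
    (ha : (a.map (·.1)).Pairwise (· < ·)) (hs : (s.map (·.1)).Pairwise (· < ·)) :
    ∀ t ∈ pvMerge a s, t.2.1 = pvLook a t.1 ∧ t.2.2 = pvLook s t.1 := by
  induction a, s using pvMerge.induct with
  | case1 a =>
    intro t ht
    rw [pvMerge] at ht
    obtain ⟨p, hp, rfl⟩ := List.mem_map.mp ht
    exact ⟨(pv_look_nodup a ha p hp).symm, rfl⟩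
  | case2 q s ih =>
    rw [List.map_cons, List.pairwise_cons] at hs
    intro t ht
    rw [show pvMerge [] (q :: s) = (q.1, (none : Option PvRec), some q.2) :: pvMerge [] s from by
      rw [pvMerge]] at ht
    rcases List.mem_cons.mp ht with rfl | ht
    · refine ⟨rfl, ?_⟩
      exact (pv_look_head q s hs.1).symm
    · obtain ⟨h1, h2⟩ := ih ha hs.2 t ht
      refine ⟨h1, ?_⟩
      have hmem := (pv_merge_mem [] s t.1).mp (List.mem_map.mpr ⟨t, ht, rfl⟩)
      have hts : t.1 ∈ s.map (·.1) := by
        rcases hmem with h | h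
        · simp at h
        · exact h
      have hne : ¬ t.1 = q.1 := by
        intro e
        have := hs.1 t.1 hts
        rw [e] at this
        exact lt_irrefl _ this
      rw [pv_look_tail _ _ _ hne]
      exact h2
  | case3 p a q s hlt ih =>
    rw [List.map_cons, List.pairwise_cons] at ha
    intro t ht
    rw [show pvMerge (p :: a) (q :: s)
        = (p.1, some p.2, (none : Option PvRec)) :: pvMerge a (q :: s) by
      rw [pvMerge]; simp [hlt]] at ht
    rcases List.mem_cons.mp ht with rfl | ht
    · refine ⟨(pv_look_head p a ha.1).symm, ?_⟩
      refine (pv_look_not_mem _ _ ?_).symm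
      rw [List.map_cons]
      intro hmem
      rcases List.mem_cons.mp hmem with e | hmem
      · exact absurd (e ▸ hlt) (lt_irrefl _)
      · rw [List.map_cons, List.pairwise_cons] at hs
        exact absurd (lt_trans hlt (hs.1 _ hmem)) (lt_irrefl _)
    · obtain ⟨h1, h2⟩ := ih ha.2 hs t ht
      have hmem := (pv_merge_mem a (q :: s) t.1).mp (List.mem_map.mpr ⟨t, ht, rfl⟩)
      have hgt : p.1 < t.1 := by
        rcases hmem with h | h
        · exact ha.1 _ h
        · rw [List.map_cons] at h
          rcases List.mem_cons.mp h with e | h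
          · exact e ▸ hlt
          · rw [List.map_cons, List.pairwise_cons] at hs
            exact lt_trans hlt (hs.1 _ h)
      rw [pv_look_tail _ _ _ (fun e => absurd (e ▸ hgt) (lt_irrefl _))]
      exact ⟨h1, h2⟩
  | case4 p a q s hlt hlt2 ih =>
    rw [List.map_cons, List.pairwise_cons] at hs
    intro t ht
    rw [show pvMerge (p :: a) (q :: s)
        = (q.1, (none : Option PvRec), some q.2) :: pvMerge (p :: a) s by
      rw [pvMerge]; simp [hlt, hlt2]] at ht
    rcases List.mem_cons.mp ht with rfl | ht
    · refine ⟨?_, (pv_look_head q s hs.1).symm⟩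
      refine (pv_look_not_mem _ _ ?_).symm
      rw [List.map_cons]
      intro hmem
      rcases List.mem_cons.mp hmem with e | hmem
      · exact absurd (e ▸ hlt2) (lt_irrefl _)
      · rw [List.map_cons, List.pairwise_cons] at ha
        exact absurd (lt_trans hlt2 (ha.1 _ hmem)) (lt_irrefl _)
    · obtain ⟨h1, h2⟩ := ih ha hs.2 t ht
      have hmem := (pv_merge_mem (p :: a) s t.1).mp (List.mem_map.mpr ⟨t, ht, rfl⟩)
      have hgt : q.1 < t.1 := by
        rcases hmem with h | h
        · rw [List.map_cons] at h
          rcases List.mem_cons.mp h with e | h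
          · exact e ▸ hlt2
          · rw [List.map_cons, List.pairwise_cons] at ha
            exact lt_trans hlt2 (ha.1 _ h)
        · exact hs.1 _ h
      rw [pv_look_tail q s _ (fun e => absurd (e ▸ hgt) (lt_irrefl _))]
      exact ⟨h1, h2⟩
  | case5 p a q s hlt hlt2 ih =>
    have hpq : p.1 = q.1 := le_antisymm (le_of_not_gt hlt2) (le_of_not_gt hlt)
    rw [List.map_cons, List.pairwise_cons] at ha hs
    intro t ht
    rw [show pvMerge (p :: a) (q :: s)
        = (p.1, some p.2, some q.2) :: pvMerge a s by
      rw [pvMerge]; simp [hlt, hlt2]] at ht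
    rcases List.mem_cons.mp ht with rfl | ht
    · refine ⟨(pv_look_head p a ha.1).symm, ?_⟩
      rw [show (p.1, some p.2, some q.2).1 = q.1 from hpq]
      exact (pv_look_head q s hs.1).symm
    · obtain ⟨h1, h2⟩ := ih ha.2 hs.2 t ht
      have hmem := (pv_merge_mem a s t.1).mp (List.mem_map.mpr ⟨t, ht, rfl⟩)
      have hgt : p.1 < t.1 := by
        rcases hmem with h | h
        · exact ha.1 _ h
        · exact hpq ▸ hs.1 _ h
      rw [pv_look_tail p a _ (fun e => absurd (e ▸ hgt) (lt_irrefl _)),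
        pv_look_tail q s _ (fun e => absurd (e ▸ (hpq ▸ hgt)) (lt_irrefl _))]
      exact ⟨h1, h2⟩

theorem pv_splitA (l : List PvRec)
    (d : PySem.Dict String PvRec) (acc : List PvRec) :
    l.foldl (fun st record =>
      if pvKeyA record ≠ "" then (st.1.insert (pvKeyA record) record, st.2)
      else (st.1, st.2 ++ [record])) (d, acc)
    = ((l.filter (fun r => decide (pvKeyA r ≠ ""))).foldl (fun d r => d.insert (pvKeyA r) r) d,
       acc ++ l.filter (fun r => decide (pvKeyA r = ""))) := by
  induction l generalizing d acc with
  | nil => simp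
  | cons r t ih =>
    by_cases h : pvKeyA r ≠ ""
    · simp only [List.foldl_cons, if_pos h, List.filter_cons]
      rw [ih]
      simp [h]
    · simp only [List.foldl_cons, if_neg h, List.filter_cons]
      rw [ih]
      simp at h
      simp [h]

theorem pv_splitB (l : List PvRec) (ps : List PvPair) (acc : List PvRec) :
    l.foldl (fun st record =>
      if pvKeyA record ≠ "" then (st.1 ++ [(pvKeyA record, record)], st.2)
      else (st.1, st.2 ++ [record])) (ps, acc)
    = (ps ++ (l.filter (fun r => decide (pvKeyA r ≠ ""))).map (fun r => (pvKeyA r, r)),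
       acc ++ l.filter (fun r => decide (pvKeyA r = ""))) := by
  induction l generalizing ps acc with
  | nil => simp
  | cons r t ih =>
    by_cases h : pvKeyA r ≠ ""
    · simp only [List.foldl_cons, if_pos h, List.filter_cons]
      rw [ih]
      simp [h]
    · simp only [List.foldl_cons, if_neg h, List.filter_cons]
      rw [ih]
      simp at h
      simp [h]

-- the whole matched-pairs pipeline of B, characterised for one source list of pairs

theorem pv_side (pairs : List PvPair) :
    let dA := pvCollapse (PySem.List.sorted pairs (fun p => p.1) false)
    ((dA.map (·.1)).Pairwise (· < ·)
      ∧ (∀ x, x ∈ dA.map (·.1) ↔ x ∈ pairs.map (·.1))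
      ∧ ∀ k, pvLook dA k = pvLook pairs k) := by
  intro dA
  have hpw : ((PySem.List.sorted pairs (fun p => p.1) false).map (·.1)).Pairwise (· ≤ ·) :=
    PySem.List.sorted_map_key_pairwise pairs (fun p => p.1)
  obtain ⟨hck, hcl⟩ := pv_collapse_spec _ hpw
  refine ⟨?_, ?_, ?_⟩
  · rw [hck]; exact pv_dedup_pairwise_lt _ hpw
  · intro x
    rw [hck, PySem.List.mem_dedup]
    exact ((PySem.List.sorted_perm pairs (fun p => p.1) false).map (·.1)).mem_iff
  · intro k
    rw [hcl k]
    unfold pvLook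
    rw [pv_sorted_filter]

theorem pv_core (pA pS : List PvPair) :
    (PySem.List.sorted (PySem.Set.union
        (PySem.Set.ofList (pA.foldl (fun d p => d.insert p.1 p.2) (PySem.Dict.empty : PySem.Dict String PvRec)).keys)
        (PySem.Set.ofList (pS.foldl (fun d p => d.insert p.1 p.2) (PySem.Dict.empty : PySem.Dict String PvRec)).keys))
        (fun x => x) false).foldl
      (fun acc m => acc ++ [(m,
        (pA.foldl (fun d p => d.insert p.1 p.2) (PySem.Dict.empty : PySem.Dict String PvRec)).get? m,
        (pS.foldl (fun d p => d.insert p.1 p.2) (PySem.Dict.empty : PySem.Dict String PvRec)).get? m)]) []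
    = pvMerge (pvCollapse (PySem.List.sorted pA (fun p => p.1) false))
              (pvCollapse (PySem.List.sorted pS (fun p => p.1) false)) := by
  have hget : ∀ (l : List PvPair) k,
      (l.foldl (fun d p => d.insert p.1 p.2) (PySem.Dict.empty : PySem.Dict String PvRec)).get? k
        = pvLook l k := by
    intro l k
    rw [pv_dict_look]
    unfold pvLook
    cases (l.filter (fun p => p.1 = k)).getLast? <;> simp
  have hkeys : ∀ (l : List PvPair) x,
      x ∈ (l.foldl (fun d p => d.insert p.1 p.2) (PySem.Dict.empty : PySem.Dict String PvRec)).keys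
        ↔ x ∈ l.map (·.1) := by
    intro l x
    have hk := PySem.Dict.keys_foldl_insert_key (ν := PvRec) l (fun p => p.1) (fun _ p => p.2)
      PySem.Dict.empty
    rw [hk, PySem.Dict.keys_empty, PySem.Set.update_nil_left, PySem.Set.mem_ofList]
  obtain ⟨hltA, hmemA, hlookA⟩ := pv_side pA
  obtain ⟨hltS, hmemS, hlookS⟩ := pv_side pS
  have hpwM := pv_merge_pairwise _ _ hltA hltS
  have hperm : ((pvMerge (pvCollapse (PySem.List.sorted pA (fun p => p.1) false))
      (pvCollapse (PySem.List.sorted pS (fun p => p.1) false))).map (·.1)).Perm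
      (PySem.Set.union
        (PySem.Set.ofList (pA.foldl (fun d p => d.insert p.1 p.2) (PySem.Dict.empty : PySem.Dict String PvRec)).keys)
        (PySem.Set.ofList (pS.foldl (fun d p => d.insert p.1 p.2) (PySem.Dict.empty : PySem.Dict String PvRec)).keys)) := by
    rw [List.perm_ext_iff_of_nodup (hpwM.imp (fun h => ne_of_lt h))
      (PySem.Set.nodup_union _ _ (PySem.Set.nodup_ofList _))]
    intro x
    rw [pv_merge_mem, PySem.Set.mem_union, PySem.Set.mem_ofList, PySem.Set.mem_ofList,
      hkeys pA x, hkeys pS x, hmemA x, hmemS x]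
  have hsorted := PySem.List.sorted_eq_of_perm_of_pairwise_lt _ _ (fun x => x) hperm hpwM
  rw [PySem.List.foldl_append_singleton_eq_map, List.nil_append, hsorted, List.map_map]
  refine (List.map_congr_left ?_).trans (List.map_id _)
  intro t ht
  obtain ⟨h1, h2⟩ := pv_merge_look _ _ hltA hltS t ht
  simp only [Function.comp, id_eq]
  rw [hget pA, hget pS, ← hlookA, ← hlookS, ← h1, ← h2]

theorem match_records_eq (alma seek : List PvRec) :
    match_records alma seek = match_records_alt alma seek := by
  unfold match_records match_records_alt index_by_mms_id pvSplitKeyed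
  rw [pv_splitA, pv_splitA, pv_splitB, pv_splitB]
  simp only [List.nil_append]
  refine Prod.ext ?_ rfl
  simp only []
  rw [← List.foldl_map (f := fun r => (pvKeyA r, r))
    (g := fun (d : PySem.Dict String PvRec) (p : PvPair) => d.insert p.1 p.2)
    (l := alma.filter (fun r => decide (pvKeyA r ≠ ""))) (init := PySem.Dict.empty),
    ← List.foldl_map (f := fun r => (pvKeyA r, r))
    (g := fun (d : PySem.Dict String PvRec) (p : PvPair) => d.insert p.1 p.2)
    (l := seek.filter (fun r => decide (pvKeyA r ≠ ""))) (init := PySem.Dict.empty)]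
  exact pv_core _ _

-- ===== VERDICT (by name: the statement is the Claim_ definition above) =====
theorem match_records_spec : Claim_equal_match_records := by
  intro alma seek _
  unfold Spec_match_records
  exact match_records_eq alma seek
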